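-- pv_equiv track=rewrite | github.com/itosha35/Programming | PYTHON/Seminar_2/task_extra_2.py | perform_operations
-- ===== SOURCE A (Python) =====
-- def perform_operations(nums, signs):
--     nums = list(map(int, nums))
--     result = nums.pop(0)
--     n = 1
--     for s in signs:
--         if s == '+':
--             result += nums.pop(0)
--         if s == '-':
--             result -= nums.pop(0)
--         n += 1
--     return result
-- ===== SOURCE B (Python) =====
-- def perform_operations(nums, signs):
--     nums = [int(x) for x in nums]
--     adds = []
--     subs = []
--     idx = 1
--     for s in signs:
--         if s == '+':
--             adds.append(nums[idx])
--             idx += 1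
--         elif s == '-':
--             subs.append(nums[idx])
--             idx += 1
--     return nums[0] + sum(adds) - sum(subs)
-- ===== Notes on version B (the rewrite author's own statement) =====
-- stated objective: alternative
-- what changed: Instead of popping from the list and keeping one interleaved running total, B walks signs with a position index, grouping the operands into an adds list and a subs list, and reduces in two phases at the end: nums[0] + sum(adds) - sum(subs).
import Mathlib
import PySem

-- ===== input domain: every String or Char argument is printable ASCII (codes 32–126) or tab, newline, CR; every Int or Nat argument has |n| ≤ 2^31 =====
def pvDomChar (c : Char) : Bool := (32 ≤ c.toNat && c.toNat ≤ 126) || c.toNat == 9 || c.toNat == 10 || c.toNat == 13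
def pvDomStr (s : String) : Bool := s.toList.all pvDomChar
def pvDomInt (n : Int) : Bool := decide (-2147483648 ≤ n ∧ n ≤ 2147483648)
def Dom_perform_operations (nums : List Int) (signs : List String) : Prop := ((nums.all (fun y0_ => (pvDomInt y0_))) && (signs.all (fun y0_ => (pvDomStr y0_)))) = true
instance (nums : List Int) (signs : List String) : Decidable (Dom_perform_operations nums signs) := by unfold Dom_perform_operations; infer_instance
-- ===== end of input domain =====

-- B groups the '+' and '-' operands into two lists via a position index and reduces in two
-- phases (nums[0] + sum(adds) - sum(subs)) instead of A's destructive pop(0) running total.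


-- ===== PORT A =====
-- A's loop: running result, popping the remaining list; none = IndexError on an exhausted pop.
def pvALoop (signs : List String) (result : Int) (nums : List Int) : Option Int :=
  match signs with
  | [] => some result
  | s :: rest =>
    if s == "+" then
      match nums with
      | [] => none
      | x :: xs => pvALoop rest (result + x) xs
    else if s == "-" then
      match nums with
      | [] => none
      | x :: xs => pvALoop rest (result - x) xs
    else pvALoop rest result nums

def perform_operations (nums : List Int) (signs : List String) : Int :=
  match nums with
  | [] => 0  -- Python raises IndexError at nums.pop(0); excluded by Pre_
  | x :: xs => (pvALoop signs x xs).getD 0  -- none (exhausted pop) excluded by Pre_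

-- ===== PORT B =====
-- B's loop: build the adds and subs lists, indexing the untouched nums at idx; none = IndexError.
def pvBLoop (signs : List String) (nums : List Int) (idx : Int) : Option (List Int × List Int) :=
  match signs with
  | [] => some ([], [])
  | s :: rest =>
    if s == "+" then
      match PySem.List.pyGet? nums idx with
      | none => none
      | some v => (pvBLoop rest nums (idx + 1)).map (fun p => (v :: p.1, p.2))
    else if s == "-" then
      match PySem.List.pyGet? nums idx with
      | none => none
      | some v => (pvBLoop rest nums (idx + 1)).map (fun p => (p.1, v :: p.2))
    else pvBLoop rest nums idx

def perform_operations_alt (nums : List Int) (signs : List String) : Int :=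
  match pvBLoop signs nums 1 with
  | none => 0  -- IndexError in the loop; excluded by Pre_
  | some p =>
    match PySem.List.pyGet? nums 0 with
    | none => 0  -- IndexError at nums[0]; excluded by Pre_
    | some x => x + p.1.sum - p.2.sum

-- ===== PRECONDITION & SPEC =====
-- Pre_ excludes exactly the inputs where Python A raises IndexError: an empty nums, or more
-- '+'/'-' signs than remaining elements.
def Pre_perform_operations (nums : List Int) (signs : List String) : Prop :=
  nums ≠ [] ∧ (signs.countP (fun s => s == "+" || s == "-")) < nums.length
instance (nums : List Int) (signs : List String) : Decidable (Pre_perform_operations nums signs) := by unfold Pre_perform_operations; infer_instance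
def pvWitness_perform_operations : List Int × List String := ([5, 2, 3], ["+", "-"])

def Spec_perform_operations (nums : List Int) (signs : List String) (out : Int) : Prop := out = perform_operations_alt nums signs
instance (nums : List Int) (signs : List String) (out : Int) : Decidable (Spec_perform_operations nums signs out) := by unfold Spec_perform_operations; infer_instance

-- ===== CLAIM (what is proved, stated in full; the proofs are below) =====
def Claim_equal_perform_operations : Prop := ∀ (nums : List Int) (signs : List String), Dom_perform_operations nums signs → Pre_perform_operations nums signs → Spec_perform_operations nums signs (perform_operations nums signs)

-- ===== LEMMAS AND PROOFS =====

-- Core invariant: after c pops beyond the head, A's remaining list is full.drop (c+1) and B's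
-- index is c+1; with enough elements left both loops succeed and agree.
theorem pv_loops_agree (signs : List String) : ∀ (full : List Int) (c : Nat) (r : Int),
    c + 1 + signs.countP (fun s => s == "+" || s == "-") ≤ full.length →
    ∃ adds subs, pvBLoop signs full ((c : Int) + 1) = some (adds, subs) ∧
      pvALoop signs r (full.drop (c + 1)) = some (r + adds.sum - subs.sum) := by
  induction signs with
  | nil =>
    intro full c r _
    exact ⟨[], [], rfl, by simp [pvALoop]⟩
  | cons s rest ih =>
    intro full c r h
    by_cases hp : s == "+"
    · have hlt : c + 1 < full.length := by
        simp [hp] at h; omega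
      obtain ⟨adds, subs, hb, ha⟩ := ih full (c + 1) (r + full[c + 1]) (by
        simp [hp] at h; omega)
      refine ⟨full[c + 1] :: adds, subs, ?_, ?_⟩
      · have hg : PySem.List.pyGet? full ((c : Int) + 1) = some full[c + 1] := by
          have := PySem.List.pyGet?_natCast full (c + 1)
          simp at this
          simp [this, hlt]
        simp [pvBLoop, hp, hg]
        have : ((c : Int) + 1 + 1) = (((c + 1 : Nat) : Int) + 1) := by push_cast; ring
        rw [this, hb]
      · have hd : full.drop (c + 1) = full[c + 1] :: full.drop (c + 2) := by
          rw [List.drop_eq_getElem_cons hlt]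
        rw [hd]
        simp [pvALoop, hp]
        rw [show c + 1 + 1 = c + 2 from rfl] at ha
        rw [ha]; simp; ring
    · by_cases hm : s == "-"
      · have hlt : c + 1 < full.length := by
          simp [hm] at h; omega
        obtain ⟨adds, subs, hb, ha⟩ := ih full (c + 1) (r - full[c + 1]) (by
          simp [hm] at h; omega)
        refine ⟨adds, full[c + 1] :: subs, ?_, ?_⟩
        · have hg : PySem.List.pyGet? full ((c : Int) + 1) = some full[c + 1] := by
            have := PySem.List.pyGet?_natCast full (c + 1)
            simp at this
            simp [this, hlt]
          simp [pvBLoop, hp, hm, hg]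
          have : ((c : Int) + 1 + 1) = (((c + 1 : Nat) : Int) + 1) := by push_cast; ring
          rw [this, hb]
        · have hd : full.drop (c + 1) = full[c + 1] :: full.drop (c + 2) := by
            rw [List.drop_eq_getElem_cons hlt]
          rw [hd]
          simp [pvALoop, hp, hm]
          rw [show c + 1 + 1 = c + 2 from rfl] at ha
          rw [ha]; simp; ring
      · obtain ⟨adds, subs, hb, ha⟩ := ih full c r (by
          simp [hp, hm] at h; omega)
        exact ⟨adds, subs, by simp [pvBLoop, hp, hm, hb], by simp [pvALoop, hp, hm, ha]⟩

-- ===== VERDICT (by name: the statement is the Claim_ definition above) =====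
theorem perform_operations_spec : Claim_equal_perform_operations := by
  intro nums signs _ hpre
  obtain ⟨hne, hcnt⟩ := hpre
  match nums with
  | [] => exact absurd rfl hne
  | x :: xs =>
    obtain ⟨adds, subs, hb, ha⟩ := pv_loops_agree signs (x :: xs) 0 x (by
      simp at hcnt ⊢; omega)
    show perform_operations (x :: xs) signs = perform_operations_alt (x :: xs) signs
    simp only [perform_operations, perform_operations_alt]
    simp only [Int.natCast_zero, Int.zero_add] at hb
    simp only [List.drop_succ_cons, List.drop_zero] at ha
    rw [hb, ha]
    simp [PySem.List.pyGet?_zero_cons]
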